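-- pv_equiv track=rewrite | github.com/csy9730/tool_misc | arith/problems/fibonaci/hanoi/leastCommon.py | getLeastCommon
-- ===== SOURCE A (Python) =====
-- from functools import lru_cache
--
-- def getLeastCommon(x):
--     x.sort(key=lambda x:x[1])
--     x.sort(key=lambda x:x[0])
--     @lru_cache()
--     def _getLeastCommon(i, j):
--         if i == j:
--             return 1
--         if x[i][1] >= x[j][0]:
--             # todo
--             return 1
--         lst = []
--         for k in range(i, j):
--             lst.append(_getLeastCommon(i, k) + _getLeastCommon(k+1, j))
--         return min(lst)
--     return _getLeastCommon(0, len(x)-1)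
-- ===== SOURCE B (Python) =====
-- def getLeastCommon(x):
--     x.sort(key=lambda t: t[1])
--     x.sort(key=lambda t: t[0])
--     n = len(x)
--     dp = {}
--     for i in range(n):
--         dp[(i, i)] = 1
--     for L in range(1, n):
--         for i in range(n - L):
--             j = i + L
--             if x[i][1] >= x[j][0]:
--                 dp[(i, j)] = 1
--             else:
--                 dp[(i, j)] = min(dp[(i, k)] + dp[(k + 1, j)] for k in range(i, j))
--     return dp[(0, n - 1)]
-- ===== Notes on version B (the rewrite author's own statement) =====
-- stated objective: alternative
-- what changed: Replaced the lru_cache top-down recursion with bottom-up tabulation into a dict keyed by (i,j), iterating interval lengths; both in-place sorts kept.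
import Mathlib
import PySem

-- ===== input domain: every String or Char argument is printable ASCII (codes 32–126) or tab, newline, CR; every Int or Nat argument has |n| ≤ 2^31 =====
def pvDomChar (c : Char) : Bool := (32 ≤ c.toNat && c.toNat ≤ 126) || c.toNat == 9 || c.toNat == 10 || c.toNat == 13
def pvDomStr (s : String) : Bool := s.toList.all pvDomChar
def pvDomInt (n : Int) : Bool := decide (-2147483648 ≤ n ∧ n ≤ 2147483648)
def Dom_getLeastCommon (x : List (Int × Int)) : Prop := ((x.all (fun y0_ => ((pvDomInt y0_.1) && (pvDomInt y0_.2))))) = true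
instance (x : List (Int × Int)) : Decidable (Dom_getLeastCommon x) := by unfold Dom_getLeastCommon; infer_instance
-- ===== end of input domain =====

-- B replaces A's lru_cache top-down recursion by bottom-up tabulation into a dict
-- keyed by (i, j) (no recursion/cache machinery); both Pythons sort the argument
-- in place identically, and the equivalence proved is about the return value.

-- ===== PORT A =====
-- both Python versions start with x.sort(key=λt:t[1]); x.sort(key=λt:t[0]) — shared helper
def pvSortX (x : List (Int × Int)) : List (Int × Int) :=
  PySem.List.sorted (PySem.List.sorted x (fun t => t.2)) (fun t => t.1)

-- A's recursion _getLeastCommon(i,j); fuel only makes the recursion structural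
-- (each call strictly shrinks j - i, so fuel = length is never exhausted);
-- lru_cache only affects speed, not values
def pvRecA (xs : List (Int × Int)) (fuel i j : Nat) : Int :=
  if i = j then 1
  else if (xs.getD i (0,0)).2 ≥ (xs.getD j (0,0)).1 then 1
  else match fuel with
    | 0 => 0
    | fuel' + 1 =>
      (((List.range' i (j - i)).map
          (fun k => pvRecA xs fuel' i k + pvRecA xs fuel' (k + 1) j)).min?).getD 0

def getLeastCommon (x : List (Int × Int)) : Int :=
  let xs := pvSortX x
  pvRecA xs xs.length 0 (xs.length - 1)

-- ===== PORT B =====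
-- one inner-loop step of the tabulation: writes dp[(i, i+L)]
def pvDpInner (xs : List (Int × Int)) (L : Nat) (dp : PySem.Dict (Nat × Nat) Int)
    (i : Nat) : PySem.Dict (Nat × Nat) Int :=
  let j := i + L
  if (xs.getD i (0,0)).2 ≥ (xs.getD j (0,0)).1 then dp.insert (i, j) 1
  else
    dp.insert (i, j)
      ((((List.range' i L).map
          (fun k => dp.getD (i, k) 0 + dp.getD (k + 1, j) 0)).min?).getD 0)

def getLeastCommon_alt (x : List (Int × Int)) : Int :=
  let xs := pvSortX x
  let n := xs.length
  let dp0 := (List.range n).foldl (fun d i => d.insert (i, i) (1:Int)) PySem.Dict.empty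
  let dp :=
    (List.range' 1 (n - 1)).foldl
      (fun d L => (List.range (n - L)).foldl (pvDpInner xs L) d) dp0
  dp.getD (0, n - 1) 0

-- ===== PRECONDITION & SPEC =====
-- Pre_ excludes only the empty list, on which A raises IndexError (f(0,-1) reads x[0]).
def Pre_getLeastCommon (x : List (Int × Int)) : Prop := x ≠ []
instance (x : List (Int × Int)) : Decidable (Pre_getLeastCommon x) := by
  unfold Pre_getLeastCommon; infer_instance
def pvWitness_getLeastCommon : (List (Int × Int)) := [((0:Int), (1:Int))]

def Spec_getLeastCommon (x : List (Int × Int)) (out : Int) : Prop := out = getLeastCommon_alt x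
instance (x : List (Int × Int)) (out : Int) : Decidable (Spec_getLeastCommon x out) := by
  unfold Spec_getLeastCommon; infer_instance

-- ===== CLAIM (what is proved, stated in full; the proofs are below) =====
def Claim_equal_getLeastCommon : Prop :=
  ∀ (x : List (Int × Int)), Dom_getLeastCommon x → Pre_getLeastCommon x →
    Spec_getLeastCommon x (getLeastCommon x)

-- ===== LEMMAS AND PROOFS =====

-- proof-side reference function: A's recursion by well-founded recursion on j - i
def pvR (xs : List (Int × Int)) (i j : Nat) : Int :=
  if i = j then 1
  else if (xs.getD i (0,0)).2 ≥ (xs.getD j (0,0)).1 then 1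
  else (((List.range' i (j - i)).attach.map
          (fun k => pvR xs i k.1 + pvR xs (k.1 + 1) j)).min?).getD 0
termination_by j - i
decreasing_by
  all_goals
    have hk := List.mem_range'_1.mp k.2
    omega

-- pvR's else-branch list, with the `attach` (needed only for termination) removed
theorem pvR_eq (xs : List (Int × Int)) (i j : Nat) (hne : i ≠ j)
    (hc : ¬ (xs.getD i (0,0)).2 ≥ (xs.getD j (0,0)).1) :
    pvR xs i j =
      (((List.range' i (j - i)).map (fun k => pvR xs i k + pvR xs (k + 1) j)).min?).getD 0 := by
  rw [pvR, if_neg hne, if_neg hc]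
  simp

-- with enough fuel, port A's recursion is the reference function
theorem pvRecA_eq_pvR (xs : List (Int × Int)) :
    ∀ (fuel i j : Nat), j - i ≤ fuel → pvRecA xs fuel i j = pvR xs i j := by
  intro fuel
  induction fuel with
  | zero =>
    intro i j h
    by_cases hne : i = j
    · rw [pvRecA, pvR, if_pos hne, if_pos hne]
    · have hji : j < i := by omega
      by_cases hc : (xs.getD i (0,0)).2 ≥ (xs.getD j (0,0)).1
      · rw [pvRecA, pvR, if_neg hne, if_neg hne, if_pos hc, if_pos hc]
      · rw [pvRecA, if_neg hne, if_neg hc, pvR_eq xs i j hne hc,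
            show j - i = 0 by omega]
        simp
  | succ fuel ih =>
    intro i j h
    by_cases hne : i = j
    · rw [pvRecA, pvR, if_pos hne, if_pos hne]
    · by_cases hc : (xs.getD i (0,0)).2 ≥ (xs.getD j (0,0)).1
      · rw [pvRecA, pvR, if_neg hne, if_neg hne, if_pos hc, if_pos hc]
      · rw [pvRecA, if_neg hne, if_neg hc, pvR_eq xs i j hne hc]
        congr 2
        apply List.map_congr_left
        intro k hk
        have hk' := List.mem_range'_1.mp hk
        rw [ih i k (by omega), ih (k + 1) j (by omega)]

-- "dp agrees with A's recursion on every interval of length < M"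
def pvGood (xs : List (Int × Int)) (dp : PySem.Dict (Nat × Nat) Int) (M : Nat) : Prop :=
  ∀ a b : Nat, a ≤ b → b < xs.length → b - a < M → dp.getD (a, b) 0 = pvR xs a b

theorem pvDp0_spec (m : Nat) (a b : Nat) :
    (((List.range m).foldl (fun d i => d.insert (i, i) (1:Int))
        PySem.Dict.empty).getD (a, b) 0) = if a = b ∧ a < m then 1 else 0 := by
  induction m with
  | zero => simp [PySem.Dict.getD_empty]
  | succ m ih =>
    rw [List.range_succ, List.foldl_append, List.foldl_cons, List.foldl_nil,
        PySem.Dict.getD_insert, ih]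
    by_cases h1 : (a, b) = ((m : Nat), (m : Nat))
    · rw [if_pos h1]
      have : a = m ∧ b = m := Prod.mk.injEq .. ▸ Prod.mk.inj h1
      rw [if_pos ⟨this.1.trans this.2.symm, by omega⟩]
    · rw [if_neg h1]
      by_cases h2 : a = b ∧ a < m
      · rw [if_pos h2, if_pos ⟨h2.1, by omega⟩]
      · rw [if_neg h2, if_neg ?_]
        rintro ⟨rfl, hlt⟩
        rcases Nat.lt_succ_iff_lt_or_eq.mp hlt with h' | h'
        · exact h2 ⟨rfl, h'⟩
        · exact h1 (by simp [h'])

-- the value written by one inner step is A's value, given correct shorter intervals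
theorem pvDpInner_spec (xs : List (Int × Int)) (L : Nat) (hL : 1 ≤ L)
    (dp : PySem.Dict (Nat × Nat) Int) (hG : pvGood xs dp L) (i : Nat)
    (hi : i + L < xs.length) :
    ∀ a b, (pvDpInner xs L dp i).getD (a, b) 0 =
      if (a, b) = (i, i + L) then pvR xs i (i + L) else dp.getD (a, b) 0 := by
  intro a b
  simp only [pvDpInner]
  by_cases hc : (xs.getD i (0,0)).2 ≥ (xs.getD (i + L) (0,0)).1
  · rw [if_pos hc, PySem.Dict.getD_insert]
    by_cases hab : ((a : Nat), (b : Nat)) = ((i : Nat), i + L)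
    · rw [if_pos hab, if_pos hab, pvR, if_neg (show ¬ i = i + L by omega), if_pos hc]
    · rw [if_neg hab, if_neg hab]
  · rw [if_neg hc, PySem.Dict.getD_insert]
    by_cases hab : ((a : Nat), (b : Nat)) = ((i : Nat), i + L)
    · rw [if_pos hab, if_pos hab, pvR_eq xs i (i + L) (by omega) hc,
          Nat.add_sub_cancel_left]
      congr 2
      apply List.map_congr_left
      intro k hk
      have hk' := List.mem_range'_1.mp hk
      rw [hG i k (by omega) (by omega) (by omega),
          hG (k + 1) (i + L) (by omega) (by omega) (by omega)]
    · rw [if_neg hab, if_neg hab]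

-- the inner fold fills every entry of length L up to index i+cnt and keeps shorter ones
theorem pvInnerFold (xs : List (Int × Int)) (L : Nat) (hL : 1 ≤ L) :
    ∀ (cnt i : Nat) (dp : PySem.Dict (Nat × Nat) Int), i + cnt ≤ xs.length - L →
      pvGood xs dp L →
      (∀ a, a < i → a + L < xs.length → dp.getD (a, a + L) 0 = pvR xs a (a + L)) →
      pvGood xs ((List.range' i cnt).foldl (pvDpInner xs L) dp) L ∧
      (∀ a, a < i + cnt → a + L < xs.length →
        ((List.range' i cnt).foldl (pvDpInner xs L) dp).getD (a, a + L) 0 =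
          pvR xs a (a + L)) := by
  intro cnt
  induction cnt with
  | zero => intro i dp _ hG hset; exact ⟨hG, fun a ha h => hset a (by omega) h⟩
  | succ cnt ih =>
    intro i dp hcnt hG hset
    rw [List.range'_succ, List.foldl_cons]
    have hi : i + L < xs.length := by omega
    have hstep := pvDpInner_spec xs L hL dp hG i hi
    have hG1 : pvGood xs (pvDpInner xs L dp i) L := by
      intro a b hab hb hlt
      rw [hstep a b]
      have hne : ¬ ((a : Nat), (b : Nat)) = ((i : Nat), i + L) := by
        intro h
        have := Prod.mk.inj h
        omega
      rw [if_neg hne]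
      exact hG a b hab hb hlt
    have hset1 : ∀ a, a < i + 1 → a + L < xs.length →
        (pvDpInner xs L dp i).getD (a, a + L) 0 = pvR xs a (a + L) := by
      intro a ha hln
      rw [hstep a (a + L)]
      by_cases hai : a = i
      · subst hai; rw [if_pos rfl]
      · have hne : ¬ ((a : Nat), a + L) = ((i : Nat), i + L) := by
          intro h
          exact hai (Prod.mk.inj h).1
        rw [if_neg hne]
        exact hset a (by omega) hln
    have hrec := ih (i + 1) (pvDpInner xs L dp i) (by omega) hG1 hset1
    exact ⟨hrec.1, fun a ha h => hrec.2 a (by omega) h⟩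

-- the outer fold over lengths L0, L0+1, … extends pvGood
theorem pvOuterFold (xs : List (Int × Int)) :
    ∀ (cnt L0 : Nat) (dp : PySem.Dict (Nat × Nat) Int), 1 ≤ L0 → pvGood xs dp L0 →
      pvGood xs ((List.range' L0 cnt).foldl
        (fun d L => (List.range (xs.length - L)).foldl (pvDpInner xs L) d) dp)
        (L0 + cnt) := by
  intro cnt
  induction cnt with
  | zero => intro L0 dp _ hG; simpa using hG
  | succ cnt ih =>
    intro L0 dp hL0 hG
    rw [List.range'_succ, List.foldl_cons,
        show List.range (xs.length - L0) = List.range' 0 (xs.length - L0) from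
          List.range_eq_range']
    have hinner := pvInnerFold xs L0 hL0 (xs.length - L0) 0 dp (by omega) hG
      (fun a ha _ => absurd ha (Nat.not_lt_zero a))
    have hG1 : pvGood xs ((List.range' 0 (xs.length - L0)).foldl (pvDpInner xs L0) dp)
        (L0 + 1) := by
      intro a b hab hb hlt
      by_cases hcase : b - a < L0
      · exact hinner.1 a b hab hb hcase
      · have hbe : b = a + L0 := by omega
        subst hbe
        exact hinner.2 a (by omega) (by omega)
    rw [show L0 + (cnt + 1) = (L0 + 1) + cnt by omega]
    exact ih (L0 + 1) _ (by omega) hG1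

theorem pvAlt_eq_pvR (x : List (Int × Int)) (hx : pvSortX x ≠ []) :
    getLeastCommon_alt x = pvR (pvSortX x) 0 ((pvSortX x).length - 1) := by
  unfold getLeastCommon_alt
  set xs := pvSortX x with hxs
  have hn : 1 ≤ xs.length := List.length_pos_of_ne_nil hx
  have hG0 : pvGood xs
      ((List.range xs.length).foldl (fun d i => d.insert (i, i) (1:Int))
        PySem.Dict.empty) 1 := by
    intro a b hab hb hlt
    have hba : a = b := by omega
    subst hba
    rw [pvDp0_spec, if_pos ⟨rfl, hb⟩, pvR, if_pos rfl]
  have hfin := pvOuterFold xs (xs.length - 1) 1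
    ((List.range xs.length).foldl (fun d i => d.insert (i, i) (1:Int))
      PySem.Dict.empty) (by omega) hG0
  rw [show 1 + (xs.length - 1) = xs.length by omega] at hfin
  exact hfin 0 (xs.length - 1) (by omega) (by omega) (by omega)

-- ===== VERDICT (by name: the statement is the Claim_ definition above) =====
theorem getLeastCommon_spec : Claim_equal_getLeastCommon := by
  intro x _ hpre
  unfold Pre_getLeastCommon at hpre
  unfold Spec_getLeastCommon getLeastCommon
  have hx : pvSortX x ≠ [] := by
    unfold pvSortX
    simp only [ne_eq, PySem.List.sorted_eq_nil_iff]
    exact hpre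
  rw [pvAlt_eq_pvR x hx, pvRecA_eq_pvR (pvSortX x) (pvSortX x).length 0
        ((pvSortX x).length - 1) (by omega)]
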